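-- pv_equiv track=rewrite | github.com/kalimokai/pmbootstrap | pmb/ci/__init__.py | sort_scripts_by_speed
-- ===== SOURCE A (Python) =====
-- import collections
--
-- def sort_scripts_by_speed(scripts):
--     """ Order the scripts, so fast scripts run before slow scripts. Whether a
--         script is fast or not is determined by the '# Options: slow' comment in
--         the file.
--         :param scripts: return of get_ci_scripts()
--         :returns: same format as get_ci_scripts(), but as ordered dict with
--                   fast scripts before slow scripts """
--     ret = collections.OrderedDict()
--
--     # Fast scripts first
--     for script_name, script in scripts.items():
--         if "slow" in script["options"]:
--             continue
--         ret[script_name] = script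
--
--     # Then slow scripts
--     for script_name, script in scripts.items():
--         if "slow" not in script["options"]:
--             continue
--         ret[script_name] = script
--     return ret
-- ===== SOURCE B (Python) =====
-- import collections
--
-- def sort_scripts_by_speed(scripts):
--     """ Order the scripts, so fast scripts run before slow scripts (single
--         stable sort instead of two partitioning passes). """
--     return collections.OrderedDict(
--         sorted(scripts.items(), key=lambda kv: "slow" in kv[1]["options"]))
-- ===== Notes on version B (the rewrite author's own statement) =====
-- stated objective: idiomatic
-- what changed: The two partitioning passes building an OrderedDict are replaced by a single stable sort of scripts.items() on the boolean key '"slow" in options' (False sorts before True, stability preserves the original order within each group), wrapped in an OrderedDict.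
import Mathlib
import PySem

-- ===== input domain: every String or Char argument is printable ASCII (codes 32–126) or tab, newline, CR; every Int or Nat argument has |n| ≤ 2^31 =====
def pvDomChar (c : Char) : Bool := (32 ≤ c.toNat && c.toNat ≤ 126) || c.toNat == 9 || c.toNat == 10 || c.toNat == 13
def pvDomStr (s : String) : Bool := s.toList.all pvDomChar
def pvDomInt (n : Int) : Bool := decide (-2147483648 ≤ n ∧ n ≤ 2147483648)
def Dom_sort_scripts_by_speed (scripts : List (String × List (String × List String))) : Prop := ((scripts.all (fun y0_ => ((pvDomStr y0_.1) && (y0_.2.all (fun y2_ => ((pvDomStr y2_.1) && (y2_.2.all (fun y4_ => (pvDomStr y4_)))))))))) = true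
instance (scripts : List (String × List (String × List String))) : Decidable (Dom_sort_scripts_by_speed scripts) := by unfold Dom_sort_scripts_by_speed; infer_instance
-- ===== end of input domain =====

-- ===== PORT A =====
-- A builds an OrderedDict in two passes: fast scripts (no "slow" option) first, then slow ones.
-- script["options"] raises KeyError when the key is missing: excluded by Pre_ below (.getD [] is never reached there).
def pvOptSlowA (script : List (String × List String)) : Bool :=
  (((PySem.Dict.mk script).get? "options").getD []).contains "slow"

def sort_scripts_by_speed (scripts : List (String × List (String × List String))) : List (String × List (String × List String)) :=
  let ret : PySem.Dict String (List (String × List String)) := PySem.Dict.empty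
  -- Fast scripts first
  let ret := scripts.foldl (fun ret kv => if pvOptSlowA kv.2 then ret else ret.insert kv.1 kv.2) ret
  -- Then slow scripts
  let ret := scripts.foldl (fun ret kv => if !pvOptSlowA kv.2 then ret else ret.insert kv.1 kv.2) ret
  ret.items

-- ===== PORT B =====
-- B: one stable sort of the items on the boolean key '"slow" in kv[1]["options"]', wrapped in an OrderedDict.
def pvOptSlowB (kv : String × List (String × List String)) : Bool :=
  (((PySem.Dict.mk kv.2).get? "options").getD []).contains "slow"

def sort_scripts_by_speed_alt (scripts : List (String × List (String × List String))) : List (String × List (String × List String)) :=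
  (PySem.Dict.ofList (PySem.List.sorted scripts (fun kv => pvOptSlowB kv) false)).items

-- ===== PRECONDITION & SPEC =====
-- Pre_ requires every script to carry the "options" key (otherwise A raises KeyError) and the outer
-- association list to have distinct keys (it represents a Python dict, which cannot hold duplicates).
def Pre_sort_scripts_by_speed (scripts : List (String × List (String × List String))) : Prop :=
  (scripts.map (fun kv => kv.1)).Nodup ∧
    ∀ kv ∈ scripts, (PySem.Dict.mk kv.2).contains "options" = true
instance (scripts : List (String × List (String × List String))) : Decidable (Pre_sort_scripts_by_speed scripts) := by unfold Pre_sort_scripts_by_speed; infer_instance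

def pvWitness_sort_scripts_by_speed : (List (String × List (String × List String))) :=
  [("build", [("options", ["slow"])]), ("lint", [("options", [])])]

def Spec_sort_scripts_by_speed (scripts : List (String × List (String × List String))) (out : List (String × List (String × List String))) : Prop := out = sort_scripts_by_speed_alt scripts
instance (scripts : List (String × List (String × List String))) (out : List (String × List (String × List String))) : Decidable (Spec_sort_scripts_by_speed scripts out) := by unfold Spec_sort_scripts_by_speed; infer_instance

-- ===== CLAIM (what is proved, stated in full; the proofs are below) =====
def Claim_equal_sort_scripts_by_speed : Prop := ∀ (scripts : List (String × List (String × List String))), Dom_sort_scripts_by_speed scripts → Pre_sort_scripts_by_speed scripts → Spec_sort_scripts_by_speed scripts (sort_scripts_by_speed scripts)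

-- ===== LEMMAS AND PROOFS =====

-- the two defining equations of PySem.List.insertBy, as rewrite rules
lemma pvInsertBy_nil {alpha : Type} (before : alpha → alpha → Bool) (x : alpha) :
    PySem.List.insertBy before x [] = [x] := rfl

lemma pvInsertBy_cons {alpha : Type} (before : alpha → alpha → Bool) (x y : alpha) (ys : List alpha) :
    PySem.List.insertBy before x (y :: ys) =
      if before x y then x :: y :: ys else y :: PySem.List.insertBy before x ys := rfl

-- Inserting x into a list partitioned as (all-false keys) ++ (all-true keys):
-- a false-keyed x lands right before the true block, a true-keyed x at the very end.
lemma pvInsertBy_partition {alpha : Type} (key : alpha → Bool) (x : alpha) (A B : List alpha)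
    (hA : ∀ a ∈ A, key a = false) (hB : ∀ b ∈ B, key b = true) :
    PySem.List.insertBy (fun a b => decide (key a < key b)) x (A ++ B) =
      if key x then A ++ (B ++ [x]) else A ++ x :: B := by
  induction A with
  | nil =>
    simp only [List.nil_append]
    induction B with
    | nil => cases h : key x <;> simp [pvInsertBy_nil]
    | cons b t ih =>
      have hb := hB b (List.mem_cons_self)
      have iht := ih (fun y hy => hB y (List.mem_cons_of_mem _ hy))
      rw [pvInsertBy_cons]
      cases h : key x with
      | false => simp [Bool.lt_iff, hb]
      | true =>
        rw [if_pos h] at iht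
        simp [hb, iht]
  | cons a A' ih =>
    have ha := hA a (List.mem_cons_self)
    have ihA := ih (fun y hy => hA y (List.mem_cons_of_mem _ hy))
    rw [List.cons_append, pvInsertBy_cons, if_neg (by simp [Bool.lt_iff, ha]), ihA]
    cases h : key x <;> simp

-- The insertion-sort fold over a boolean key keeps the false block before the true block,
-- appending to the matching block in input order (stability).
lemma pvFoldlInsertBy_partition {alpha : Type} (key : alpha → Bool) (xs A B : List alpha)
    (hA : ∀ a ∈ A, key a = false) (hB : ∀ b ∈ B, key b = true) :
    xs.foldl (fun acc x => PySem.List.insertBy (fun a b => decide (key a < key b)) x acc) (A ++ B) =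
      (A ++ xs.filter (fun x => !key x)) ++ (B ++ xs.filter key) := by
  induction xs generalizing A B with
  | nil => simp
  | cons x t ih =>
    simp only [List.foldl_cons, pvInsertBy_partition key x A B hA hB]
    cases h : key x with
    | false =>
      have := ih (A ++ [x]) B
        (by intro a ha; rcases List.mem_append.1 ha with h' | h'
            · exact hA a h'
            · simp at h'; subst h'; exact h) hB
      rw [if_neg (by simp)]
      have hx : A ++ x :: B = (A ++ [x]) ++ B := by simp
      rw [hx, this]
      simp [h]
    | true =>
      have := ih A (B ++ [x]) hA
        (by intro b hb; rcases List.mem_append.1 hb with h' | h'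
            · exact hB b h'
            · simp at h'; subst h'; exact h)
      rw [if_pos rfl, this]
      simp [h]

-- Python's stable sort on a boolean key is exactly 'false block ++ true block', each in input order.
lemma pvSorted_bool_key {alpha : Type} (key : alpha → Bool) (xs : List alpha) :
    PySem.List.sorted xs key false = xs.filter (fun x => !key x) ++ xs.filter key := by
  have := pvFoldlInsertBy_partition key xs [] []
    (by intro a ha; simp at ha) (by intro b hb; simp at hb)
  simpa [PySem.List.sorted_eq_foldl_insertBy] using this

-- A loop that 'continue's on p is a fold over the elements with ¬p.
lemma pvFoldl_skip {alpha delta : Type} (p : alpha → Bool) (g : delta → alpha → delta)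
    (l : List alpha) (init : delta) :
    l.foldl (fun acc x => if p x then acc else g acc x) init
      = (l.filter (fun x => !p x)).foldl g init := by
  rw [← PySem.List.foldl_if_eq_foldl_filter (fun x => !p x) g l init]
  apply PySem.List.foldl_congr_mem
  intro acc x _
  cases p x <;> simp

-- Folding fresh, distinct-keyed pairs into a dict appends them to its items.
lemma pvItems_foldl_insert {l : List (String × List (String × List String))}
    {d : PySem.Dict String (List (String × List String))}
    (hfresh : ∀ a ∈ l, d.contains a.1 = false) (hnd : (l.map (fun kv => kv.1)).Nodup) :
    (l.foldl (fun d kv => d.insert kv.1 kv.2) d).items = d.items ++ l := by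
  have := PySem.Dict.items_foldl_insert_fresh l (fun kv => kv.1) (fun kv => kv.2) d hfresh hnd
  simpa using this

-- ===== VERDICT (by name: the statement is the Claim_ definition above) =====
theorem sort_scripts_by_speed_spec : Claim_equal_sort_scripts_by_speed := by
  intro scripts _ hpre
  obtain ⟨hnd, _⟩ := hpre
  unfold Spec_sort_scripts_by_speed sort_scripts_by_speed sort_scripts_by_speed_alt
  have hkey : ∀ kv : String × List (String × List String), pvOptSlowB kv = pvOptSlowA kv.2 :=
    fun kv => rfl
  -- name the two blocks
  set F := scripts.filter (fun kv => !pvOptSlowA kv.2) with hF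
  set S := scripts.filter (fun kv => pvOptSlowA kv.2) with hS
  -- B side: the sorted list is F ++ S, and its keys are Nodup (it is a permutation of scripts)
  have hsorted : PySem.List.sorted scripts (fun kv => pvOptSlowB kv) false = F ++ S := by
    simp only [hkey] at *
    exact pvSorted_bool_key (fun kv => pvOptSlowA kv.2) scripts
  have hFnd : (F.map (fun kv => kv.1)).Nodup :=
    hnd.sublist (List.filter_sublist.map _)
  have hSnd : (S.map (fun kv => kv.1)).Nodup :=
    hnd.sublist (List.filter_sublist.map _)
  have hdisj : ∀ a ∈ S, a.1 ∉ F.map (fun kv => kv.1) := by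
    intro a haS hmem
    obtain ⟨b, hbF, hb1⟩ := List.mem_map.1 hmem
    have haS' := List.mem_filter.1 haS
    have hbF' := List.mem_filter.1 hbF
    have hab : b = a := List.inj_on_of_nodup_map hnd hbF'.1 haS'.1 hb1
    rw [hab] at hbF'
    simp [haS'.2] at hbF'
  -- A side
  have hA1 : scripts.foldl (fun ret kv => if pvOptSlowA kv.2 then ret else ret.insert kv.1 kv.2)
      PySem.Dict.empty = F.foldl (fun d kv => d.insert kv.1 kv.2) PySem.Dict.empty := by
    exact pvFoldl_skip (fun kv => pvOptSlowA kv.2) _ scripts _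
  have hA2 : ∀ d : PySem.Dict String (List (String × List String)),
      scripts.foldl (fun ret kv => if !pvOptSlowA kv.2 then ret else ret.insert kv.1 kv.2) d
        = S.foldl (fun d kv => d.insert kv.1 kv.2) d := by
    intro d
    have := pvFoldl_skip (fun kv => !pvOptSlowA kv.2) (fun d kv => d.insert kv.1 kv.2) scripts d
    simpa [hS] using this
  have hret1 : (F.foldl (fun d kv => d.insert kv.1 kv.2) PySem.Dict.empty).items = F :=
    by simpa using pvItems_foldl_insert (d := PySem.Dict.empty) (by simp) hFnd
  have hfresh2 : ∀ a ∈ S,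
      (F.foldl (fun d kv => d.insert kv.1 kv.2) PySem.Dict.empty).contains a.1 = false := by
    intro a ha
    rw [PySem.Dict.contains_eq_decide_mem_keys]
    simp only [PySem.Dict.keys, hret1]
    simpa using hdisj a ha
  -- both sides reduce to F ++ S
  simp only [hA1, hA2, hsorted, PySem.Dict.ofList]
  have hBnd : ((F ++ S).map (fun kv => kv.1)).Nodup := by
    rw [List.map_append]
    exact List.Nodup.append (by simpa using hFnd) (by simpa using hSnd)
      (by intro x hx1 hx2
          obtain ⟨a, haS, ha1⟩ := List.mem_map.1 hx2
          exact hdisj a haS (ha1 ▸ hx1))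
  have hB : (PySem.Dict.empty.update (F ++ S)).items = F ++ S := by
    unfold PySem.Dict.update
    simpa using pvItems_foldl_insert (d := PySem.Dict.empty) (by simp) hBnd
  rw [hB, pvItems_foldl_insert hfresh2 hSnd, hret1]
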